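-- pv_equiv track=rewrite | github.com/emp3thy/better-memory | better_memory/hooks/post_commit.py | _parse_trailer_value
-- ===== SOURCE A (Python) =====
-- def _parse_trailer_value(message: str, key: str) -> str | None:
--     """Return the last occurrence of trailer ``key`` in ``message``, or None.
--
--     Trailer format: ``Key: value`` on its own line, typically at the end
--     of the message after a blank line. We scan ALL lines (not only the
--     "trailer block") so the rule is simpler and robust against commit
--     messages that don't have a blank-line separator. Git's own trailer
--     parsing is more subtle but the simpler rule is adequate for an opt-in
--     signal where the user controls the commit message.
--
--     Key match is case-insensitive. Value is stripped of surrounding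
--     whitespace but otherwise preserved. Last occurrence wins (matches
--     git convention for duplicate trailers).
--     """
--     key_lower = key.lower()
--     value: str | None = None
--     for line in message.splitlines():
--         stripped = line.strip()
--         if ":" not in stripped:
--             continue
--         k, _, v = stripped.partition(":")
--         if k.strip().lower() == key_lower:
--             value = v.strip()
--     return value
-- ===== SOURCE B (Python) =====
-- def _parse_trailer_value(message: str, key: str) -> str | None:
--     """Backward scan: return at the first (= last) matching trailer.
--
--     Also skips the pre-strip of the whole line: partition the raw line
--     on ':' and test the separator, stripping only key and value.
--     """
--     key_lower = key.lower()
--     for line in reversed(message.splitlines()):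
--         k, sep, v = line.partition(":")
--         if sep and k.strip().lower() == key_lower:
--             return v.strip()
--     return None
-- ===== Notes on version B (the rewrite author's own statement) =====
-- stated objective: alternative
-- what changed: Replaces the forward scan with a last-match-wins accumulator by a backward scan over reversed(splitlines()) that returns at the first match, and replaces the strip-then-membership-test-then-partition per-line logic by partitioning the raw line on ':' and testing the returned separator, stripping only key and value.
import Mathlib
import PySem

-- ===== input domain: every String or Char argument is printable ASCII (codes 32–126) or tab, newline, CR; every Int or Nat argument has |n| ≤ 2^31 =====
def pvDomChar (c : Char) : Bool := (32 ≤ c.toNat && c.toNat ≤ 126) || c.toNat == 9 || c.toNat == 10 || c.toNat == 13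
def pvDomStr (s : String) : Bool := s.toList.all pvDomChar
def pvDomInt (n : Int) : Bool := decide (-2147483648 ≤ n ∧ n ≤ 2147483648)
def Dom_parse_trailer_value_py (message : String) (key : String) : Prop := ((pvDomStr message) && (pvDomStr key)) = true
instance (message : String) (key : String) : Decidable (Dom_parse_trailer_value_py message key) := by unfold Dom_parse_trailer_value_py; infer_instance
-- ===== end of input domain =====

-- B scans the lines backwards and returns at the first (= last) match, partitioning the
-- raw line on ':' and testing the separator instead of pre-stripping and a membership test.


-- shared primitive: Python's s.partition(sep) for a single-character separator, exact:
-- (before first sep, [sep], after first sep) and (s, [], []) when sep is absent.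
def pyPartition1 (s : List Char) (sep : Char) : List Char × List Char × List Char :=
  match s.dropWhile (· ≠ sep) with
  | [] => (s, [], [])
  | c :: rest => (s.takeWhile (· ≠ sep), [c], rest)

-- ===== PORT A =====
-- loop body of A: strip the line, "continue" unless ':' is in it, partition, overwrite on match
def pvStepA (key_lower : List Char) (value : Option String) (line : String) : Option String :=
  let stripped := PySem.Chars.strip line.toList
  if PySem.Chars.isIn [':'] stripped = false then value   -- "continue"
  else
    let p := pyPartition1 stripped ':'
    if PySem.Chars.lower (PySem.Chars.strip p.1) = key_lower then
      some (String.ofList (PySem.Chars.strip p.2.2))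
    else value

def parse_trailer_value_py (message : String) (key : String) : Option String :=
  (PySem.Str.splitlines message).foldl (pvStepA (PySem.Chars.lower key.toList)) none

-- ===== PORT B =====
-- backward scan with early return
def pvAltGo (key_lower : List Char) : List String → Option String
  | [] => none
  | line :: rest =>
    let p := pyPartition1 line.toList ':'
    if p.2.1 ≠ [] ∧ PySem.Chars.lower (PySem.Chars.strip p.1) = key_lower then
      some (String.ofList (PySem.Chars.strip p.2.2))
    else pvAltGo key_lower rest

def parse_trailer_value_py_alt (message : String) (key : String) : Option String :=
  pvAltGo (PySem.Chars.lower key.toList) (PySem.Str.splitlines message).reverse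

-- ===== PRECONDITION & SPEC =====
def Spec_parse_trailer_value_py (message : String) (key : String) (out : Option String) : Prop := out = parse_trailer_value_py_alt message key
instance (message : String) (key : String) (out : Option String) : Decidable (Spec_parse_trailer_value_py message key out) := by unfold Spec_parse_trailer_value_py; infer_instance

-- ===== CLAIM (what is proved, stated in full; the proofs are below) =====
def Claim_equal_parse_trailer_value_py : Prop := ∀ (message : String) (key : String), Dom_parse_trailer_value_py message key → Spec_parse_trailer_value_py message key (parse_trailer_value_py message key)

-- ===== LEMMAS AND PROOFS =====

-- per-line matcher of B (proof-side name for pvAltGo's body)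
def pvMatch (key_lower : List Char) (line : String) : Option String :=
  let p := pyPartition1 line.toList ':'
  if p.2.1 ≠ [] ∧ PySem.Chars.lower (PySem.Chars.strip p.1) = key_lower then
    some (String.ofList (PySem.Chars.strip p.2.2))
  else none

lemma pvAltGo_cons (kl : List Char) (l : String) (ls : List String) :
    pvAltGo kl (l :: ls) = match pvMatch kl l with
      | some r => some r
      | none => pvAltGo kl ls := by
  simp only [pvAltGo, pvMatch]
  split_ifs with h <;> simp

lemma pvAltGo_append (kl : List Char) (xs ys : List String) :
    pvAltGo kl (xs ++ ys) = match pvAltGo kl xs with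
      | some r => some r
      | none => pvAltGo kl ys := by
  induction xs with
  | nil => simp [pvAltGo]
  | cons l ls ih =>
    rw [List.cons_append, pvAltGo_cons, pvAltGo_cons]
    cases pvMatch kl l <;> simp [ih]

-- decomposition: line = spaces ++ strip line ++ spaces
lemma strip_decomp (l : List Char) :
    ∃ w w', l = w ++ PySem.Chars.strip l ++ w' ∧
      (∀ c ∈ w, PySem.Chars.isspace c = true) ∧ (∀ c ∈ w', PySem.Chars.isspace c = true) := by
  refine ⟨l.takeWhile PySem.Chars.isspace,
    ((l.dropWhile PySem.Chars.isspace).reverse.takeWhile PySem.Chars.isspace).reverse, ?_, ?_, ?_⟩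
  · simp only [PySem.Chars.strip, PySem.Chars.lstrip, PySem.Chars.rstrip]
    have hx : l.dropWhile PySem.Chars.isspace =
        ((l.dropWhile PySem.Chars.isspace).reverse.dropWhile PySem.Chars.isspace).reverse ++
          ((l.dropWhile PySem.Chars.isspace).reverse.takeWhile PySem.Chars.isspace).reverse := by
      rw [← List.reverse_append, List.takeWhile_append_dropWhile, List.reverse_reverse]
    conv_lhs => rw [← List.takeWhile_append_dropWhile (p := PySem.Chars.isspace) (l := l), hx]
    simp
  · intro c hc; exact List.mem_takeWhile_imp hc
  · intro c hc; exact List.mem_takeWhile_imp (List.mem_reverse.mp hc)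

lemma lstrip_space_append (w t : List Char) (hw : ∀ c ∈ w, PySem.Chars.isspace c = true) :
    PySem.Chars.lstrip (w ++ t) = PySem.Chars.lstrip t := by
  simp only [PySem.Chars.lstrip, List.dropWhile_append,
    List.dropWhile_eq_nil_iff.mpr hw, List.isEmpty_nil, if_true]

lemma rstrip_append_space (t w : List Char) (hw : ∀ c ∈ w, PySem.Chars.isspace c = true) :
    PySem.Chars.rstrip (t ++ w) = PySem.Chars.rstrip t := by
  simp only [PySem.Chars.rstrip, List.reverse_append, List.dropWhile_append,
    List.dropWhile_eq_nil_iff.mpr (by intro c hc; exact hw c (List.mem_reverse.mp hc)),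
    List.isEmpty_nil, if_true]

lemma strip_space_append (w t w' : List Char)
    (hw : ∀ c ∈ w, PySem.Chars.isspace c = true) (hw' : ∀ c ∈ w', PySem.Chars.isspace c = true) :
    PySem.Chars.strip (w ++ t ++ w') = PySem.Chars.strip t := by
  simp only [PySem.Chars.strip, List.append_assoc]
  rw [lstrip_space_append _ _ hw]
  by_cases ht : PySem.Chars.lstrip t = []
  · have hts : ∀ c ∈ t, PySem.Chars.isspace c = true :=
      List.dropWhile_eq_nil_iff.mp ht
    rw [lstrip_space_append t w' hts, ht]
    simp only [PySem.Chars.lstrip, List.dropWhile_eq_nil_iff.mpr hw']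
  · have : PySem.Chars.lstrip (t ++ w') = PySem.Chars.lstrip t ++ w' := by
      simp only [PySem.Chars.lstrip, List.dropWhile_append]
      split_ifs with h
      · exact absurd (List.isEmpty_iff.mp h) ht
      · rfl
    rw [this, rstrip_append_space _ _ hw']

-- membership survives strip for non-space characters
lemma mem_strip_iff (l : List Char) (c : Char) (hc : PySem.Chars.isspace c = false) :
    c ∈ PySem.Chars.strip l ↔ c ∈ l := by
  obtain ⟨w, w', hdec, hw, hw'⟩ := strip_decomp l
  constructor
  · intro h; rw [hdec]; simp [h]
  · intro h
    rw [hdec] at h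
    rcases List.mem_append.mp h with h1 | h1
    · rcases List.mem_append.mp h1 with h2 | h2
      · exact absurd (hw c h2) (by simp [hc])
      · exact h2
    · exact absurd (hw' c h1) (by simp [hc])

lemma isIn_colon_iff (s : List Char) : PySem.Chars.isIn [':'] s = true ↔ ':' ∈ s := by
  rw [PySem.Chars.isIn_iff_infix, List.singleton_infix_iff]

lemma takeWhile_append_of_drop_ne (p : Char → Bool) (xs ys : List Char)
    (h : xs.dropWhile p ≠ []) : (xs ++ ys).takeWhile p = xs.takeWhile p := by
  rw [List.takeWhile_append, if_neg]
  intro hlen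
  apply h
  have heq : xs.takeWhile p = xs := (List.takeWhile_sublist p).eq_of_length hlen
  have hsplit := List.takeWhile_append_dropWhile (p := p) (l := xs)
  rw [heq] at hsplit
  have hl := congrArg List.length hsplit
  simp only [List.length_append] at hl
  exact List.eq_nil_of_length_eq_zero (by omega)

-- the per-line step of A agrees with B's matcher on every line
lemma stepA_eq_match (kl : List Char) (value : Option String) (line : String) :
    pvStepA kl value line = match pvMatch kl line with
      | some r => some r
      | none => value := by
  simp only [pvStepA, pvMatch]
  by_cases hmem : ':' ∈ line.toList
  · -- ':' is in the line, hence in the stripped line; partitions agree up to surrounding spaces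
    obtain ⟨w, w', hdec, hw, hw'⟩ := strip_decomp line.toList
    have hmem' : ':' ∈ PySem.Chars.strip line.toList :=
      (mem_strip_iff line.toList ':' (by decide)).mpr hmem
    have hIn : PySem.Chars.isIn [':'] (PySem.Chars.strip line.toList) = true :=
      (isIn_colon_iff _).mpr hmem'
    set s := PySem.Chars.strip line.toList with hs
    have hdws : s.dropWhile (· ≠ ':') ≠ [] := by
      intro hnil
      have := (List.dropWhile_eq_nil_iff.mp hnil) ':' hmem'
      simp at this
    obtain ⟨c, rest, hcr⟩ := List.exists_cons_of_ne_nil hdws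
    have hwcolon : ∀ c' ∈ w, (decide (c' ≠ ':')) = true := by
      intro c' h'
      have hsp := hw c' h'
      simp only [decide_eq_true_eq]
      intro he; rw [he] at hsp; exact absurd hsp (by decide)
    have hdwline : line.toList.dropWhile (· ≠ ':') = s.dropWhile (· ≠ ':') ++ w' := by
      rw [hdec, List.append_assoc, List.dropWhile_append,
        List.dropWhile_eq_nil_iff.mpr hwcolon]
      simp only [List.isEmpty_nil, if_true, List.dropWhile_append, hcr]
      simp
    have htwline : line.toList.takeWhile (· ≠ ':') = w ++ s.takeWhile (· ≠ ':') := by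
      rw [hdec, List.append_assoc, List.takeWhile_append_of_pos hwcolon,
        takeWhile_append_of_drop_ne _ _ _ hdws]
    rw [if_neg (by rw [hIn]; simp)]
    simp only [pyPartition1, hcr, hdwline, htwline, List.cons_append]
    have hk : PySem.Chars.strip (w ++ s.takeWhile (· ≠ ':')) =
        PySem.Chars.strip (s.takeWhile (· ≠ ':')) := by
      have := strip_space_append w (s.takeWhile (· ≠ ':')) [] hw (by intro c' h'; cases h')
      simpa using this
    have hv : PySem.Chars.strip (rest ++ w') = PySem.Chars.strip rest := by
      have := strip_space_append [] rest w' (by intro c' h'; cases h') hw'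
      simpa using this
    simp only [hk, hv]
    by_cases hkey : PySem.Chars.lower (PySem.Chars.strip (s.takeWhile (· ≠ ':'))) = kl
    · rw [if_pos hkey, if_pos ⟨by simp, hkey⟩]
    · rw [if_neg hkey, if_neg (fun h => hkey h.2)]
  · -- no ':' anywhere: A "continue"s, B's partition has an empty separator
    have hIn : PySem.Chars.isIn [':'] (PySem.Chars.strip line.toList) = false := by
      rw [← Bool.not_eq_true, isIn_colon_iff]
      exact fun h => hmem ((mem_strip_iff line.toList ':' (by decide)).mp h)
    have hdw : line.toList.dropWhile (· ≠ ':') = [] :=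
      List.dropWhile_eq_nil_iff.mpr (by
        intro c' h'
        simp only [decide_eq_true_eq]
        intro he; rw [he] at h'; exact hmem h')
    rw [if_pos hIn]
    simp only [pyPartition1, hdw]
    simp

lemma foldl_eq_altGo (kl : List Char) (ls : List String) (acc : Option String) :
    ls.foldl (pvStepA kl) acc = match pvAltGo kl ls.reverse with
      | some r => some r
      | none => acc := by
  induction ls generalizing acc with
  | nil => simp [pvAltGo]
  | cons l t ih =>
    rw [List.foldl_cons, ih, List.reverse_cons, pvAltGo_append]
    rw [stepA_eq_match]
    have : pvAltGo kl [l] = pvMatch kl l := by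
      rw [show [l] = l :: [] by rfl, pvAltGo_cons]
      cases pvMatch kl l <;> simp [pvAltGo]
    rw [this]
    cases pvAltGo kl t.reverse <;> cases pvMatch kl l <;> simp

-- ===== VERDICT (by name: the statement is the Claim_ definition above) =====
theorem parse_trailer_value_py_spec : Claim_equal_parse_trailer_value_py := by
  intro message key _
  unfold Spec_parse_trailer_value_py parse_trailer_value_py parse_trailer_value_py_alt
  rw [foldl_eq_altGo]
  cases pvAltGo (PySem.Chars.lower key.toList) (PySem.Str.splitlines message).reverse <;> simp
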